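-- pv_equiv track=rewrite | github.com/ronyut/bisli | pyan-master/Transcript.py | removeSharedLetters
-- ===== SOURCE A (Python) =====
-- import collections
--
-- def removeSharedLetters(x, y):
--     count = lambda x: collections.Counter(c for c in x.lower())
--     cx, cy = count(x), count(y)
--     diff  = cx - cy
--     rev_diff = cy - cx
--     rev_diff = list(rev_diff)
--     diff = list(diff)
--
--     return sorted(rev_diff + diff)
-- ===== SOURCE B (Python) =====
-- def removeSharedLetters(x, y):
--     # Sort both lowered strings, then merge-scan run by run: a letter whose run
--     # lengths differ between the two sorted lists is emitted once; the output
--     # comes out already sorted, so no Counter and no final sort is needed.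
--     a = sorted(x.lower())
--     b = sorted(y.lower())
--     out = []
--     i = j = 0
--     while i < len(a) or j < len(b):
--         if j == len(b) or (i < len(a) and a[i] < b[j]):
--             c = a[i]
--             while i < len(a) and a[i] == c:
--                 i += 1
--             out.append(c)
--         elif i == len(a) or b[j] < a[i]:
--             c = b[j]
--             while j < len(b) and b[j] == c:
--                 j += 1
--             out.append(c)
--         else:
--             c = a[i]
--             ci = cj = 0
--             while i < len(a) and a[i] == c:
--                 i += 1
--                 ci += 1
--             while j < len(b) and b[j] == c:
--                 j += 1
--                 cj += 1
--             if ci != cj: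
--                 out.append(c)
--     return out
-- ===== Notes on version B (the rewrite author's own statement) =====
-- stated objective: alternative
-- what changed: B drops Counters and multiset subtraction entirely: it sorts both lowered strings and runs a two-pointer merge over them, comparing run lengths letter by letter and emitting each letter whose runs differ, so the result comes out already sorted with no Counter and no final sort.
import Mathlib
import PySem

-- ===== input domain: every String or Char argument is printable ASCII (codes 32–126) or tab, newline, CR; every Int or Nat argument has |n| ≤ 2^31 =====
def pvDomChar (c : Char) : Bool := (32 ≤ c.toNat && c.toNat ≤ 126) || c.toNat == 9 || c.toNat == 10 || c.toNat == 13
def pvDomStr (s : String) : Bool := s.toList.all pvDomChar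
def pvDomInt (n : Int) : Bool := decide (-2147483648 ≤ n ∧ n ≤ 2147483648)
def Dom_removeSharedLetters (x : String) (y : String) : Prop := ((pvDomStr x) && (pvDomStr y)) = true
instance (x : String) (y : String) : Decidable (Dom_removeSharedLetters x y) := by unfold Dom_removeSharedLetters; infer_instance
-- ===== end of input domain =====

-- B replaces Counter subtraction by sort-both-strings + two-pointer run-length merge (alternative algorithm; same result).

-- ===== PORT A =====
-- Counter.__sub__: keep self's keys whose resulting count is positive, in self's key order.
-- (CPython's second loop — keys of `other` with a NEGATIVE count absent from self — can never
-- fire here, since counters built from an iterable only hold counts ≥ 1; exact for A's inputs.)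
def counterSub (c d : PySem.Dict Char Int) : PySem.Dict Char Int :=
  c.items.foldl
    (fun r p => if 0 < p.2 - d.getD p.1 0 then r.insert p.1 (p.2 - d.getD p.1 0) else r)
    PySem.Dict.empty

def removeSharedLetters (x : String) (y : String) : List String :=
  let cx := PySem.Dict.counter (PySem.Str.lower x).toList
  let cy := PySem.Dict.counter (PySem.Str.lower y).toList
  let diff := (counterSub cx cy).keys.map (fun c => String.ofList [c])      -- list(diff) = its keys
  let revDiff := (counterSub cy cx).keys.map (fun c => String.ofList [c])   -- list(rev_diff)
  PySem.List.sorted (revDiff ++ diff) (fun s => s) false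

-- ===== PORT B =====
-- The two-pointer while loop of Source B: each inner `while … == c` run-skip is transcribed as
-- dropWhile (its length, counted by ci/cj in Source B, as 1 + takeWhile-length); branch order as in Source B.
def mergeRuns : List Char → List Char → List String
  | [], [] => []
  | c :: as, [] =>                          -- j == len(b) (and i < len(a))
      String.ofList [c] :: mergeRuns (as.dropWhile (· == c)) []
  | [], d :: bs =>                          -- i == len(a)
      String.ofList [d] :: mergeRuns [] (bs.dropWhile (· == d))
  | c :: as, d :: bs =>
      if c < d then
        String.ofList [c] :: mergeRuns (as.dropWhile (· == c)) (d :: bs)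
      else if d < c then
        String.ofList [d] :: mergeRuns (c :: as) (bs.dropWhile (· == d))
      else                                  -- equal letter: compare run lengths ci, cj
        let ci := 1 + (as.takeWhile (· == c)).length
        let cj := 1 + (bs.takeWhile (· == c)).length
        let rest := mergeRuns (as.dropWhile (· == c)) (bs.dropWhile (· == c))
        if ci ≠ cj then String.ofList [c] :: rest else rest
termination_by a b => a.length + b.length
decreasing_by
  · have := List.length_dropWhile_le (fun x => x == c) as
    simp only [List.length_cons]; omega
  · have := List.length_dropWhile_le (fun x => x == d) bs
    simp only [List.length_cons]; omega
  · have := List.length_dropWhile_le (fun x => x == c) as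
    simp only [List.length_cons]; omega
  · have := List.length_dropWhile_le (fun x => x == d) bs
    simp only [List.length_cons]; omega
  · have h1 := List.length_dropWhile_le (fun x => x == c) as
    have h2 := List.length_dropWhile_le (fun x => x == c) bs
    simp only [List.length_cons]; omega

def removeSharedLetters_alt (x : String) (y : String) : List String :=
  let a := PySem.List.sorted (PySem.Str.lower x).toList (fun c => c) false
  let b := PySem.List.sorted (PySem.Str.lower y).toList (fun c => c) false
  mergeRuns a b

-- ===== PRECONDITION & SPEC =====
def Spec_removeSharedLetters (x : String) (y : String) (out : List String) : Prop := out = removeSharedLetters_alt x y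
instance (x : String) (y : String) (out : List String) : Decidable (Spec_removeSharedLetters x y out) := by unfold Spec_removeSharedLetters; infer_instance

-- ===== CLAIM (what is proved, stated in full; the proofs are below) =====
def Claim_equal_removeSharedLetters : Prop := ∀ (x : String) (y : String), Dom_removeSharedLetters x y → Spec_removeSharedLetters x y (removeSharedLetters x y)

-- ===== LEMMAS AND PROOFS =====

theorem mk_injective : Function.Injective (fun c : Char => String.ofList [c]) := by
  intro a b h
  have h2 := congrArg String.toList h
  simp only [String.toList_ofList] at h2
  exact List.head_eq_of_cons_eq h2

theorem mk_lt_mk {c d : Char} (h : c < d) : String.ofList [c] < String.ofList [d] := by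
  rw [String.lt_iff_toList_lt]
  simp only [String.toList_ofList]
  exact List.cons_lt_cons_iff.mpr (Or.inl h)

theorem keys_counterSub (xs ys : List Char) :
    (counterSub (PySem.Dict.counter xs) (PySem.Dict.counter ys)).keys
      = (PySem.Set.ofList xs).filter (fun c => decide ((ys.count c : Int) < (xs.count c : Int))) := by
  unfold counterSub
  rw [PySem.List.foldl_ite_eq_foldl_filter, PySem.Dict.items_counter, List.filter_map,
    List.foldl_map]
  simp only [PySem.Dict.keys]
  rw [PySem.Dict.items_foldl_insert_fresh _ (fun a => a)
        (fun a => ((xs.count a : Int)) - (PySem.Dict.counter ys).getD a 0) PySem.Dict.empty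
        (fun a _ => PySem.Dict.contains_empty _)
        (by simpa using ((PySem.Set.nodup_ofList xs).filter _))]
  rw [show (PySem.Dict.empty : PySem.Dict Char Int).items = [] from rfl]
  simp only [List.nil_append, List.map_map, Function.comp_def]
  rw [List.map_id']
  apply List.filter_congr
  intro c _
  simp only [PySem.Dict.getD_counter, decide_eq_decide]
  omega

-- membership of the A-side concatenation: exactly the letters with differing counts
theorem mem_A_side (xs ys : List Char) (e : String) :
    (e ∈ ((PySem.Set.ofList ys).filter (fun c => decide ((xs.count c : Int) < (ys.count c : Int)))).map (fun c => String.ofList [c])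
        ++ ((PySem.Set.ofList xs).filter (fun c => decide ((ys.count c : Int) < (xs.count c : Int)))).map (fun c => String.ofList [c]))
      ↔ ∃ c, e = String.ofList [c] ∧ xs.count c ≠ ys.count c := by
  simp only [List.mem_append, List.mem_map, List.mem_filter, PySem.Set.mem_ofList,
    decide_eq_true_eq]
  constructor
  · rintro (⟨c, ⟨_, hlt⟩, rfl⟩ | ⟨c, ⟨_, hlt⟩, rfl⟩) <;> exact ⟨c, rfl, by omega⟩
  · rintro ⟨c, rfl, hne⟩
    rcases Nat.lt_or_ge (xs.count c) (ys.count c) with h | h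
    · exact Or.inl ⟨c, ⟨List.count_pos_iff.mp (by omega), by exact_mod_cast h⟩, rfl⟩
    · have h2 : ys.count c < xs.count c := by omega
      exact Or.inr ⟨c, ⟨List.count_pos_iff.mp (by omega), by exact_mod_cast h2⟩, rfl⟩

theorem nodup_side (zs : List Char) (p : Char → Bool) :
    (((PySem.Set.ofList zs).filter p).map (fun c => String.ofList [c])).Nodup :=
  ((PySem.Set.nodup_ofList zs).filter p).map mk_injective

theorem nodup_A_side (xs ys : List Char) :
    (((PySem.Set.ofList ys).filter (fun c => decide ((xs.count c : Int) < (ys.count c : Int)))).map (fun c => String.ofList [c])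
        ++ ((PySem.Set.ofList xs).filter (fun c => decide ((ys.count c : Int) < (xs.count c : Int)))).map (fun c => String.ofList [c])).Nodup := by
  rw [List.nodup_append]
  refine ⟨nodup_side _ _, nodup_side _ _, ?_⟩
  intro s hs t ht
  rcases List.mem_map.mp hs with ⟨c, hc, rfl⟩
  rcases List.mem_map.mp ht with ⟨c', hc', rfl⟩
  intro he
  cases mk_injective he
  rcases List.mem_filter.mp hc with ⟨_, h1⟩
  rcases List.mem_filter.mp hc' with ⟨_, h2⟩
  simp only [decide_eq_true_eq] at h1 h2
  omega

-- ---- B-side: order facts about sorted lists and dropWhile/takeWhile ----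

theorem mem_dropWhile_gt {c : Char} : ∀ (as : List Char), (∀ e ∈ as, c ≤ e) →
    as.Pairwise (· ≤ ·) → ∀ e ∈ as.dropWhile (· == c), c < e := by
  intro as
  induction as with
  | nil => simp
  | cons f rest ih =>
    intro hle hpw e he
    rw [List.dropWhile_cons] at he
    by_cases hfc : (f == c) = true
    · rw [if_pos hfc] at he
      exact ih (fun e h => hle e (List.mem_cons_of_mem _ h)) (List.pairwise_cons.mp hpw).2 e he
    · rw [if_neg hfc] at he
      have hne : f ≠ c := fun h => hfc (by simp [h])
      have hcf : c < f := lt_of_le_of_ne (hle f List.mem_cons_self) (Ne.symm hne)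
      rcases List.mem_cons.mp he with rfl | he
      · exact hcf
      · exact lt_of_lt_of_le hcf ((List.pairwise_cons.mp hpw).1 e he)

theorem sorted_tail_ge {c : Char} {as : List Char} (h : (c :: as).Pairwise (· ≤ ·)) :
    ∀ e ∈ as, c ≤ e := (List.pairwise_cons.mp h).1

theorem dropWhile_gt {c : Char} {as : List Char} (h : (c :: as).Pairwise (· ≤ ·)) :
    ∀ e ∈ as.dropWhile (· == c), c < e :=
  mem_dropWhile_gt as (sorted_tail_ge h) (List.pairwise_cons.mp h).2

theorem dropWhile_pairwise {c : Char} {as : List Char} (h : as.Pairwise (· ≤ ·)) :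
    (as.dropWhile (· == c)).Pairwise (· ≤ ·) :=
  List.Pairwise.sublist (List.dropWhile_suffix _).sublist h

theorem count_drop_self {c : Char} {as : List Char} (h : (c :: as).Pairwise (· ≤ ·)) :
    (as.dropWhile (· == c)).count c = 0 :=
  List.count_eq_zero.mpr (fun hc => lt_irrefl c (dropWhile_gt h c hc))

-- counts in a sorted list through the run decomposition
theorem count_self_run {c : Char} {as : List Char} (h : (c :: as).Pairwise (· ≤ ·)) :
    (c :: as).count c = 1 + (as.takeWhile (· == c)).length := by
  have hd : as.count c = (as.takeWhile (· == c)).count c + (as.dropWhile (· == c)).count c := by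
    conv_lhs => rw [← List.takeWhile_append_dropWhile (p := (· == c)) (l := as)]
    exact List.count_append ..
  have ht : (as.takeWhile (· == c)).count c = (as.takeWhile (· == c)).length :=
    List.count_eq_length.mpr (fun b hb => by
      have h2 := List.mem_takeWhile_imp (p := (· == c)) hb
      exact (beq_iff_eq.mp h2).symm)
  have hz := count_drop_self h
  rw [List.count_cons_self, hd, ht, hz]; omega

theorem count_other_run {c d : Char} {as : List Char} (_h : (c :: as).Pairwise (· ≤ ·))
    (hne : d ≠ c) : (c :: as).count d = (as.dropWhile (· == c)).count d := by
  have hd : as.count d = (as.takeWhile (· == c)).count d + (as.dropWhile (· == c)).count d := by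
    conv_lhs => rw [← List.takeWhile_append_dropWhile (p := (· == c)) (l := as)]
    exact List.count_append ..
  have ht : (as.takeWhile (· == c)).count d = 0 :=
    List.count_eq_zero.mpr (fun hc => by
      have h2 := List.mem_takeWhile_imp (p := (· == c)) hc
      exact hne (beq_iff_eq.mp h2))
  rw [List.count_cons_of_ne (Ne.symm hne), hd, ht]
  omega

theorem count_lt_head {d c : Char} {as : List Char} (h : (c :: as).Pairwise (· ≤ ·))
    (hlt : d < c) : (c :: as).count d = 0 :=
  List.count_eq_zero.mpr (fun hc => by
    rcases List.mem_cons.mp hc with rfl | hc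
    · exact lt_irrefl d hlt
    · exact absurd (sorted_tail_ge h d hc) (not_le.mpr hlt))

-- the main characterisation of the merge: membership + strict sortedness
theorem mergeRuns_spec : ∀ (a b : List Char), a.Pairwise (· ≤ ·) → b.Pairwise (· ≤ ·) →
    (∀ e, e ∈ mergeRuns a b ↔ ∃ c, e = String.ofList [c] ∧ a.count c ≠ b.count c) ∧
    (mergeRuns a b).Pairwise (· < ·) := by
  intro a b
  induction a, b using mergeRuns.induct with
  | case1 => simp [mergeRuns]
  | case2 c as ih =>
    intro ha _
    obtain ⟨ihm, ihp⟩ := ih (dropWhile_pairwise (List.pairwise_cons.mp ha).2) List.Pairwise.nil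
    rw [mergeRuns]
    constructor
    · intro e
      rw [List.mem_cons, ihm]
      constructor
      · rintro (rfl | ⟨c', rfl, hc'⟩)
        · exact ⟨c, rfl, by rw [count_self_run ha, List.count_nil]; omega⟩
        · have hne : c' ≠ c := by
            rintro rfl; exact hc' (by rw [count_drop_self ha, List.count_nil])
          exact ⟨c', rfl, by rw [count_other_run ha hne]; exact hc'⟩
      · rintro ⟨c', rfl, hc'⟩
        by_cases hne : c' = c
        · exact Or.inl (by rw [hne])
        · exact Or.inr ⟨c', rfl, by rw [count_other_run ha hne] at hc'; exact hc'⟩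
    · refine List.pairwise_cons.mpr ⟨?_, ihp⟩
      intro e he
      rcases (ihm e).mp he with ⟨c', rfl, hc'⟩
      have : c' ∈ as.dropWhile (· == c) := by
        rw [List.count_nil] at hc'
        exact List.count_pos_iff.mp (by omega)
      exact mk_lt_mk (dropWhile_gt ha c' this)
  | case3 d bs ih =>
    intro _ hb
    obtain ⟨ihm, ihp⟩ := ih List.Pairwise.nil (dropWhile_pairwise (List.pairwise_cons.mp hb).2)
    rw [mergeRuns]
    constructor
    · intro e
      rw [List.mem_cons, ihm]
      constructor
      · rintro (rfl | ⟨c', rfl, hc'⟩)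
        · exact ⟨d, rfl, by rw [count_self_run hb, List.count_nil]; omega⟩
        · have hne : c' ≠ d := by
            rintro rfl; exact hc' (by rw [count_drop_self hb, List.count_nil])
          exact ⟨c', rfl, by rw [count_other_run hb hne]; exact hc'⟩
      · rintro ⟨c', rfl, hc'⟩
        by_cases hne : c' = d
        · exact Or.inl (by rw [hne])
        · exact Or.inr ⟨c', rfl, by rw [count_other_run hb hne] at hc'; exact hc'⟩
    · refine List.pairwise_cons.mpr ⟨?_, ihp⟩
      intro e he
      rcases (ihm e).mp he with ⟨c', rfl, hc'⟩
      have : c' ∈ bs.dropWhile (· == d) := by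
        rw [List.count_nil] at hc'
        exact List.count_pos_iff.mp (by omega)
      exact mk_lt_mk (dropWhile_gt hb c' this)
  | case4 c as d bs hcd ih =>
    intro ha hb
    obtain ⟨ihm, ihp⟩ := ih (dropWhile_pairwise (List.pairwise_cons.mp ha).2) hb
    rw [mergeRuns, if_pos hcd]
    constructor
    · intro e
      rw [List.mem_cons, ihm]
      constructor
      · rintro (rfl | ⟨c', rfl, hc'⟩)
        · refine ⟨c, rfl, ?_⟩
          rw [count_self_run ha, count_lt_head hb hcd]; omega
        · have hne : c' ≠ c := by
            rintro rfl
            rw [count_drop_self ha, count_lt_head hb hcd] at hc'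
            exact hc' rfl
          exact ⟨c', rfl, by rw [count_other_run ha hne]; exact hc'⟩
      · rintro ⟨c', rfl, hc'⟩
        by_cases hne : c' = c
        · exact Or.inl (by rw [hne])
        · exact Or.inr ⟨c', rfl, by rw [count_other_run ha hne] at hc'; exact hc'⟩
    · refine List.pairwise_cons.mpr ⟨?_, ihp⟩
      intro e he
      rcases (ihm e).mp he with ⟨c', rfl, hc'⟩
      have hmem : c' ∈ as.dropWhile (· == c) ∨ c' ∈ d :: bs := by
        rcases Nat.eq_zero_or_pos ((as.dropWhile (· == c)).count c') with h | h
        · exact Or.inr (List.count_pos_iff.mp (by omega))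
        · exact Or.inl (List.count_pos_iff.mp h)
      refine mk_lt_mk ?_
      rcases hmem with hm | hm
      · exact dropWhile_gt ha c' hm
      · rcases List.mem_cons.mp hm with rfl | hm
        · exact hcd
        · exact lt_of_lt_of_le hcd (sorted_tail_ge hb c' hm)
  | case5 c as d bs hcd hdc ih =>
    intro ha hb
    obtain ⟨ihm, ihp⟩ := ih ha (dropWhile_pairwise (List.pairwise_cons.mp hb).2)
    rw [mergeRuns, if_neg hcd, if_pos hdc]
    constructor
    · intro e
      rw [List.mem_cons, ihm]
      constructor
      · rintro (rfl | ⟨c', rfl, hc'⟩)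
        · refine ⟨d, rfl, ?_⟩
          rw [count_self_run hb, count_lt_head ha hdc]; omega
        · have hne : c' ≠ d := by
            rintro rfl
            rw [count_drop_self hb, count_lt_head ha hdc] at hc'
            exact hc' rfl
          exact ⟨c', rfl, by rw [count_other_run hb hne]; exact hc'⟩
      · rintro ⟨c', rfl, hc'⟩
        by_cases hne : c' = d
        · exact Or.inl (by rw [hne])
        · exact Or.inr ⟨c', rfl, by rw [count_other_run hb hne] at hc'; exact hc'⟩
    · refine List.pairwise_cons.mpr ⟨?_, ihp⟩
      intro e he
      rcases (ihm e).mp he with ⟨c', rfl, hc'⟩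
      have hmem : c' ∈ c :: as ∨ c' ∈ bs.dropWhile (· == d) := by
        rcases Nat.eq_zero_or_pos ((c :: as).count c') with h | h
        · exact Or.inr (List.count_pos_iff.mp (by omega))
        · exact Or.inl (List.count_pos_iff.mp h)
      refine mk_lt_mk ?_
      rcases hmem with hm | hm
      · rcases List.mem_cons.mp hm with rfl | hm
        · exact hdc
        · exact lt_of_lt_of_le hdc (sorted_tail_ge ha c' hm)
      · exact dropWhile_gt hb c' hm
  | case6 c as d bs hcd hdc ci cj hrun ih =>
    intro ha hb
    have hdceq : d = c := le_antisymm (not_lt.mp hcd) (not_lt.mp hdc)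
    subst hdceq
    obtain ⟨ihm, ihp⟩ := ih (dropWhile_pairwise (List.pairwise_cons.mp ha).2)
      (dropWhile_pairwise (List.pairwise_cons.mp hb).2)
    have hrun' : 1 + (as.takeWhile (· == d)).length ≠ 1 + (bs.takeWhile (· == d)).length := hrun
    have hred : mergeRuns (d :: as) (d :: bs)
        = String.ofList [d] :: mergeRuns (as.dropWhile (· == d)) (bs.dropWhile (· == d)) := by
      rw [mergeRuns, if_neg hcd, if_neg hdc]
      simp
      all_goals omega
    rw [hred]
    constructor
    · intro e
      rw [List.mem_cons, ihm]
      constructor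
      · rintro (rfl | ⟨c', rfl, hc'⟩)
        · refine ⟨d, rfl, ?_⟩
          rw [count_self_run ha, count_self_run hb]; omega
        · have hne : c' ≠ d := by
            rintro rfl
            rw [count_drop_self ha, count_drop_self hb] at hc'
            exact hc' rfl
          exact ⟨c', rfl, by rw [count_other_run ha hne, count_other_run hb hne]; exact hc'⟩
      · rintro ⟨c', rfl, hc'⟩
        by_cases hne : c' = d
        · exact Or.inl (by rw [hne])
        · exact Or.inr ⟨c', rfl, by
            rw [count_other_run ha hne, count_other_run hb hne] at hc'; exact hc'⟩
    · refine List.pairwise_cons.mpr ⟨?_, ihp⟩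
      intro e he
      rcases (ihm e).mp he with ⟨c', rfl, hc'⟩
      have hmem : c' ∈ as.dropWhile (· == d) ∨ c' ∈ bs.dropWhile (· == d) := by
        rcases Nat.eq_zero_or_pos ((as.dropWhile (· == d)).count c') with h | h
        · exact Or.inr (List.count_pos_iff.mp (by omega))
        · exact Or.inl (List.count_pos_iff.mp h)
      refine mk_lt_mk ?_
      rcases hmem with hm | hm
      · exact dropWhile_gt ha c' hm
      · exact dropWhile_gt hb c' hm
  | case7 c as d bs hcd hdc ci cj hrun ih =>
    intro ha hb
    have hdceq : d = c := le_antisymm (not_lt.mp hcd) (not_lt.mp hdc)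
    subst hdceq
    obtain ⟨ihm, ihp⟩ := ih (dropWhile_pairwise (List.pairwise_cons.mp ha).2)
      (dropWhile_pairwise (List.pairwise_cons.mp hb).2)
    have hrun' : ¬ (1 + (as.takeWhile (· == d)).length ≠ 1 + (bs.takeWhile (· == d)).length) := hrun
    have hred : mergeRuns (d :: as) (d :: bs)
        = mergeRuns (as.dropWhile (· == d)) (bs.dropWhile (· == d)) := by
      rw [mergeRuns, if_neg hcd, if_neg hdc]
      have heq := not_not.mp hrun'
      simp
      all_goals omega
    rw [hred]
    refine ⟨?_, ihp⟩
    intro e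
    rw [ihm]
    have hruneq : 1 + (as.takeWhile (· == d)).length = 1 + (bs.takeWhile (· == d)).length := not_not.mp hrun'
    constructor
    · rintro ⟨c', rfl, hc'⟩
      have hne : c' ≠ d := by
        rintro rfl
        rw [count_drop_self ha, count_drop_self hb] at hc'
        exact hc' rfl
      exact ⟨c', rfl, by rw [count_other_run ha hne, count_other_run hb hne]; exact hc'⟩
    · rintro ⟨c', rfl, hc'⟩
      have hne : c' ≠ d := by
        rintro rfl
        rw [count_self_run ha, count_self_run hb] at hc'
        exact hc' hruneq
      exact ⟨c', rfl, by rw [count_other_run ha hne, count_other_run hb hne] at hc'; exact hc'⟩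

-- ===== VERDICT (by name: the statement is the Claim_ definition above) =====
theorem removeSharedLetters_spec : Claim_equal_removeSharedLetters := by
  intro x y _
  show removeSharedLetters x y = removeSharedLetters_alt x y
  simp only [removeSharedLetters, removeSharedLetters_alt, keys_counterSub]
  set xs := (PySem.Str.lower x).toList with hxs
  set ys := (PySem.Str.lower y).toList with hys
  set a := PySem.List.sorted xs (fun c => c) false with ha
  set b := PySem.List.sorted ys (fun c => c) false with hb
  have hpa : a.Pairwise (· ≤ ·) := by simpa using PySem.List.sorted_pairwise xs (fun c => c)
  have hpb : b.Pairwise (· ≤ ·) := by simpa using PySem.List.sorted_pairwise ys (fun c => c)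
  have hca : ∀ c, a.count c = xs.count c := fun c => (PySem.List.sorted_perm ..).count_eq c
  have hcb : ∀ c, b.count c = ys.count c := fun c => (PySem.List.sorted_perm ..).count_eq c
  obtain ⟨hmem, hpw⟩ := mergeRuns_spec a b hpa hpb
  apply PySem.List.sorted_id_eq_of_perm_of_pairwise
  · apply (List.perm_ext_iff_of_nodup (hpw.imp (fun {h1 h2} h => ne_of_lt h)) (nodup_A_side xs ys)).mpr
    intro e
    rw [hmem e, mem_A_side]
    constructor
    · rintro ⟨c, rfl, hc⟩; exact ⟨c, rfl, by rw [hca, hcb] at hc; exact hc⟩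
    · rintro ⟨c, rfl, hc⟩; exact ⟨c, rfl, by rw [hca, hcb]; exact hc⟩
  · exact hpw.imp (fun {h1 h2} h => le_of_lt h)
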